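-- pv_equiv track=rewrite | github.com/rajsalla/ARSearch | processing/facos/DATYS/utils/code_extractor.py | determine_var_package
-- ===== SOURCE A (Python) =====
-- def add_method(method_simple_name, _type, single_type_method={}, multi_type_method={}):
--     if method_simple_name in multi_type_method:
--         multi_type_method[method_simple_name].append(_type)
--         return
--     if method_simple_name in single_type_method:
--         previous_type = single_type_method[method_simple_name]
--         if previous_type != _type:
--             single_type_method.pop(method_simple_name)
--             multi_type_method[method_simple_name] = [previous_type, _type]
--     else:
--         single_type_method[method_simple_name] = _type
--     return single_type_method, multi_type_method
--
-- def determine_var_package(var_type_dict, fn_var_dict):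
--     single_type_method = {}
--     multi_type_method = {}
--     for method_simple_name, var_dict in fn_var_dict.items():
--         for var, var_stmt_i in var_dict.items():
--             if var_stmt_i == 3: # extracted from stmt 3
--                 if var in var_type_dict: # if var is a variable
--                     type_candidates = list(var_type_dict[var].keys())
--                     for candidate in type_candidates:
--                         add_method(method_simple_name, candidate, single_type_method, multi_type_method)
--                 else: # if var is a package/domain
--                     if ("(" not in var) and (len(var.split(".")) > 1):
--                         add_method(method_simple_name, var, single_type_method, multi_type_method)
--                     elif (len(var.split(".")) == 1) and (var[0].isupper()):
--                         add_method(method_simple_name, var, single_type_method, multi_type_method)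
--
--             elif var_stmt_i in [4, 5]:
--                 add_method(method_simple_name, var, single_type_method, multi_type_method)
--
--     return single_type_method, multi_type_method
-- ===== SOURCE B (Python) =====
-- def determine_var_package(var_type_dict, fn_var_dict):
--     # Pass 1: extraction — collect, per method, the ordered list of emitted types.
--     emitted = {}
--     for method_simple_name, var_dict in fn_var_dict.items():
--         for var, var_stmt_i in var_dict.items():
--             if var_stmt_i == 3:
--                 if var in var_type_dict:
--                     ts = list(var_type_dict[var].keys())
--                 elif ("(" not in var) and (len(var.split(".")) > 1):
--                     ts = [var]
--                 elif (len(var.split(".")) == 1) and var[0].isupper():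
--                     ts = [var]
--                 else:
--                     ts = []
--             elif var_stmt_i in [4, 5]:
--                 ts = [var]
--             else:
--                 ts = []
--             if ts:
--                 emitted.setdefault(method_simple_name, []).extend(ts)
--     # Pass 2: closed-form classification of each method's type list.
--     single_type_method = {}
--     multi_type_method = {}
--     for method_simple_name, ts in emitted.items():
--         j = next((k for k in range(len(ts)) if ts[k] != ts[0]), None)
--         if j is None:
--             single_type_method[method_simple_name] = ts[0]
--         else:
--             multi_type_method[method_simple_name] = [ts[0]] + ts[j:]
--     return single_type_method, multi_type_method
-- ===== Notes on version B (the rewrite author's own statement) =====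
-- stated objective: alternative
-- what changed: A interleaves extraction with an incremental single/multi state machine (add_method mutating two dicts per emitted type); B first collects each method's ordered type list in one pass, then classifies each list in closed form (all-equal -> single; otherwise multi = [ts[0]] + ts from the first differing index).
import Mathlib
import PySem

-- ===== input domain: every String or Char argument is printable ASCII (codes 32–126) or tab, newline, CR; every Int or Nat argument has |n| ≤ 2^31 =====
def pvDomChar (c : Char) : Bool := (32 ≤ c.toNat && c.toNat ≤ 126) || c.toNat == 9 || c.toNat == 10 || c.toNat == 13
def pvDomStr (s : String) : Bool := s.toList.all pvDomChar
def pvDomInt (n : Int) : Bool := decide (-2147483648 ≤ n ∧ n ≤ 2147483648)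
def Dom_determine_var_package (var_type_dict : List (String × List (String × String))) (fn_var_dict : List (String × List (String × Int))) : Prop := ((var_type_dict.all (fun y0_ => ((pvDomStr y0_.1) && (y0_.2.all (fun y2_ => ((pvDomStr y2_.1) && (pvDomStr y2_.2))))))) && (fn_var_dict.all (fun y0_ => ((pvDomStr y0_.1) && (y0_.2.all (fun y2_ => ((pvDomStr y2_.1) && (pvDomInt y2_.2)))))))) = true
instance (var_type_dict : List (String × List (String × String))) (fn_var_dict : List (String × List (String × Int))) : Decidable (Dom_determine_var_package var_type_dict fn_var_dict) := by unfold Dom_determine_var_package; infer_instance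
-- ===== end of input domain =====

-- B replaces A's interleaved add_method state machine by pass 1 extraction (per-method ordered type list)
-- + pass 2 closed-form classification; same cost ("alternative"), same return value.

-- ===== PORT A =====
-- Python helper add_method: mutates the two dicts (multi: append; single: promote to multi on a
-- different type, else insert); ported as a pure state transformer on the pair.
def pvAddMethod (name ty : String)
    (st : PySem.Dict String String × PySem.Dict String (List String)) :
    PySem.Dict String String × PySem.Dict String (List String) :=
  if st.2.contains name then
    (st.1, st.2.modify name [] (fun l => l ++ [ty]))
  else if st.1.contains name then
    let prev := st.1.getD name ""
    if prev ≠ ty then (st.1.erase name, st.2.insert name [prev, ty]) else st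
  else (st.1.insert name ty, st.2)

-- body of A's inner loop (one (var, var_stmt_i) item)
def pvStepVarA (var_type_dict : List (String × List (String × String))) (name : String)
    (st : PySem.Dict String String × PySem.Dict String (List String)) (vq : String × Int) :
    PySem.Dict String String × PySem.Dict String (List String) :=
  if vq.2 = 3 then
    match (PySem.Dict.mk var_type_dict).get? vq.1 with
    | some inner => (inner.map (fun r => r.1)).foldl (fun st c => pvAddMethod name c st) st
    | none =>
      if ¬ (PySem.Str.isIn "(" vq.1) = true ∧ (PySem.Chars.splitOn vq.1.toList ['.']).length > 1 then
        pvAddMethod name vq.1 st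
      else if (PySem.Chars.splitOn vq.1.toList ['.']).length = 1 then
        match PySem.Str.pyGet? vq.1 0 with
        | some c => if PySem.Chars.isupper c then pvAddMethod name vq.1 st else st
        | none => st   -- var == "": Python raises IndexError on var[0]; excluded by Pre_
      else st
  else if vq.2 = 4 ∨ vq.2 = 5 then pvAddMethod name vq.1 st
  else st

-- body of A's outer loop (one (method_simple_name, var_dict) item)
def pvStepMethodA (var_type_dict : List (String × List (String × String)))
    (st : PySem.Dict String String × PySem.Dict String (List String))
    (mp : String × List (String × Int)) :
    PySem.Dict String String × PySem.Dict String (List String) :=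
  mp.2.foldl (pvStepVarA var_type_dict mp.1) st

def determine_var_package (var_type_dict : List (String × List (String × String))) (fn_var_dict : List (String × List (String × Int))) : (List (String × String)) × (List (String × List String)) :=
  let fin := fn_var_dict.foldl (pvStepMethodA var_type_dict) (PySem.Dict.empty, PySem.Dict.empty)
  (fin.1.items, fin.2.items)

-- ===== PORT B =====
-- the list of types one (var, var_stmt_i) item emits (Source B's `ts`)
def pvEmitTypes (var_type_dict : List (String × List (String × String))) (v : String) (i : Int) :
    List String :=
  if i = 3 then
    match (PySem.Dict.mk var_type_dict).get? v with
    | some inner => inner.map (fun r => r.1)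
    | none =>
      if ¬ (PySem.Str.isIn "(" v) = true ∧ (PySem.Chars.splitOn v.toList ['.']).length > 1 then [v]
      else if (PySem.Chars.splitOn v.toList ['.']).length = 1 then
        match PySem.Str.pyGet? v 0 with
        | some c => if PySem.Chars.isupper c then [v] else []
        | none => []   -- v == "": Python raises IndexError on v[0]; excluded by Pre_
      else []
  else if i = 4 ∨ i = 5 then [v] else []

-- body of Source B's pass-1 inner loop
def pvStepEmit (var_type_dict : List (String × List (String × String))) (name : String)
    (d : PySem.Dict String (List String)) (vq : String × Int) : PySem.Dict String (List String) :=
  let ts := pvEmitTypes var_type_dict vq.1 vq.2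
  if ts.isEmpty then d else d.modify name [] (fun l => l ++ ts)

-- body of Source B's pass-2 loop: classify one method's type list
def pvClassify (st : PySem.Dict String String × PySem.Dict String (List String))
    (p : String × List String) :
    PySem.Dict String String × PySem.Dict String (List String) :=
  match p.2 with
  | [] => st   -- unreachable from pass 1, which only stores nonempty lists
  | t0 :: _ =>
    match p.2.findIdx? (fun x => x != t0) with
    | none => (st.1.insert p.1 t0, st.2)
    | some j => (st.1, st.2.insert p.1 (t0 :: p.2.drop j))

def determine_var_package_alt (var_type_dict : List (String × List (String × String))) (fn_var_dict : List (String × List (String × Int))) : (List (String × String)) × (List (String × List String)) :=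
  let emitted := fn_var_dict.foldl
    (fun d mp => mp.2.foldl (pvStepEmit var_type_dict mp.1) d) PySem.Dict.empty
  let fin := emitted.items.foldl pvClassify (PySem.Dict.empty, PySem.Dict.empty)
  (fin.1.items, fin.2.items)

-- ===== PRECONDITION & SPEC =====
-- Pre_ excludes (a) inputs where Python A raises: a var_dict entry (var, 3) with var = "" and ""
-- not a key of var_type_dict reaches var[0] and raises IndexError (B raises the same way there);
-- (b) fn_var_dict association lists with duplicate method keys, which cannot arise from a Python
-- dict (A's argument is a dict) and on which the raw-list iteration order of the two maps is accidental.
def Pre_determine_var_package (var_type_dict : List (String × List (String × String))) (fn_var_dict : List (String × List (String × Int))) : Prop :=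
  (fn_var_dict.map (fun p => p.1)).Nodup ∧
  ∀ p ∈ fn_var_dict, ∀ q ∈ p.2, q.2 = 3 → q.1 = "" → "" ∈ var_type_dict.map (fun r => r.1)
instance (var_type_dict : List (String × List (String × String))) (fn_var_dict : List (String × List (String × Int))) : Decidable (Pre_determine_var_package var_type_dict fn_var_dict) := by unfold Pre_determine_var_package; infer_instance

def pvWitness_determine_var_package : (List (String × List (String × String))) × (List (String × List (String × Int))) :=
  ([("x", [("T", "e"), ("U", "e")])], [("m", [("x", 3), ("a.b", 3)]), ("n", [("y", 4)])])

def Spec_determine_var_package (var_type_dict : List (String × List (String × String))) (fn_var_dict : List (String × List (String × Int))) (out : (List (String × String)) × (List (String × List String))) : Prop := out = determine_var_package_alt var_type_dict fn_var_dict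
instance (var_type_dict : List (String × List (String × String))) (fn_var_dict : List (String × List (String × Int))) (out : (List (String × String)) × (List (String × List String))) : Decidable (Spec_determine_var_package var_type_dict fn_var_dict out) := by unfold Spec_determine_var_package; infer_instance

-- ===== CLAIM (what is proved, stated in full; the proofs are below) =====
def Claim_equal_determine_var_package : Prop := ∀ (var_type_dict : List (String × List (String × String))) (fn_var_dict : List (String × List (String × Int))), Dom_determine_var_package var_type_dict fn_var_dict → Pre_determine_var_package var_type_dict fn_var_dict → Spec_determine_var_package var_type_dict fn_var_dict (determine_var_package var_type_dict fn_var_dict)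

-- ===== LEMMAS AND PROOFS =====

-- all types one method's var_dict emits, in order
def pvTsOf (var_type_dict : List (String × List (String × String))) (vd : List (String × Int)) :
    List String :=
  vd.flatMap (fun q => pvEmitTypes var_type_dict q.1 q.2)

-- folding add_method over a list of types
def pvFoldAdd (name : String) (ts : List String)
    (st : PySem.Dict String String × PySem.Dict String (List String)) :
    PySem.Dict String String × PySem.Dict String (List String) :=
  ts.foldl (fun st c => pvAddMethod name c st) st

-- erasing a freshly inserted key restores the dict
lemma pv_erase_insert {ν : Type} (d : PySem.Dict String ν) (k : String) (v : ν)
    (h : d.contains k = false) : (d.insert k v).erase k = d := by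
  apply PySem.Dict.ext
  show ((d.insert k v).items.filter _) = _
  rw [PySem.Dict.items_insert_of_not_contains d v h]
  simp [List.filter_append]
  intro a b hab
  simp [PySem.Dict.contains] at h
  exact h a b hab

-- one item of A's inner loop = fold add_method over the types it emits
lemma pv_stepA (vtd : List (String × List (String × String))) (name : String)
    (st : PySem.Dict String String × PySem.Dict String (List String)) (q : String × Int) :
    pvStepVarA vtd name st q = pvFoldAdd name (pvEmitTypes vtd q.1 q.2) st := by
  obtain ⟨v, i⟩ := q
  simp only [pvStepVarA, pvEmitTypes, pvFoldAdd]
  split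
  · split
    · rfl
    · split
      · simp [List.foldl]
      · split
        · split
          · split <;> simp [List.foldl]
          · rfl
        · rfl
  · split
    · simp [List.foldl]
    · rfl

-- A's inner loop = fold add_method over all emitted types
lemma pv_innerA (vtd : List (String × List (String × String))) (name : String)
    (vd : List (String × Int)) (st : PySem.Dict String String × PySem.Dict String (List String)) :
    vd.foldl (pvStepVarA vtd name) st = pvFoldAdd name (pvTsOf vtd vd) st := by
  induction vd generalizing st with
  | nil => rfl
  | cons q vd ih =>
    simp only [List.foldl_cons, pvTsOf, List.flatMap_cons, pvFoldAdd, List.foldl_append]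
    rw [pv_stepA]
    exact ih _

-- multi phase: every further type is appended
lemma pv_foldAdd_multi (name : String) (l : List String) :
    ∀ (acc : List String) (s : PySem.Dict String String) (m : PySem.Dict String (List String)),
    m.contains name = false →
    pvFoldAdd name l (s, m.insert name acc) = (s, m.insert name (acc ++ l)) := by
  induction l with
  | nil => intro acc s m _; simp [pvFoldAdd]
  | cons x l ih =>
    intro acc s m hm
    simp only [pvFoldAdd, List.foldl_cons]
    have h1 : pvAddMethod name x (s, m.insert name acc)
        = (s, m.insert name (acc ++ [x])) := by
      simp [pvAddMethod, PySem.Dict.contains_insert_self, PySem.Dict.modify,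
        PySem.Dict.getD_insert_self, PySem.Dict.insert_insert_self]
    rw [h1]
    have := ih (acc ++ [x]) s m hm
    simp only [pvFoldAdd] at this
    rw [this]
    simp

-- after the first type was recorded: track the first index of a differing type
lemma pv_foldAdd_phase (name t0 : String) (rest : List String)
    (s : PySem.Dict String String) (m : PySem.Dict String (List String))
    (hs : s.contains name = false) (hm : m.contains name = false) :
    pvFoldAdd name rest (s.insert name t0, m)
      = match rest.findIdx? (fun x => x != t0) with
        | none => (s.insert name t0, m)
        | some j => (s, m.insert name (t0 :: rest.drop j)) := by
  induction rest generalizing s m with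
  | nil => rfl
  | cons x rest ih =>
    by_cases hx : x = t0
    · subst hx
      simp only [pvFoldAdd, List.foldl_cons]
      have h1 : pvAddMethod name x (s.insert name x, m) = (s.insert name x, m) := by
        simp [pvAddMethod, hm, PySem.Dict.contains_insert_self, PySem.Dict.getD_insert_self]
      rw [h1]
      have := ih s m hs hm
      simp only [pvFoldAdd] at this
      rw [this]
      rw [List.findIdx?_cons]
      simp only [bne_self_eq_false, Bool.false_eq_true, if_false]
      cases hfi : rest.findIdx? (fun y => y != x) with
      | none => simp
      | some j => simp
    · simp only [pvFoldAdd, List.foldl_cons]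
      have h1 : pvAddMethod name x (s.insert name t0, m)
          = (s, m.insert name [t0, x]) := by
        simp [pvAddMethod, hm, PySem.Dict.contains_insert_self, PySem.Dict.getD_insert_self,
          Ne.symm hx, pv_erase_insert s name t0 hs]
      rw [h1]
      have := pv_foldAdd_multi name rest [t0, x] s m hm
      simp only [pvFoldAdd] at this
      rw [this]
      rw [List.findIdx?_cons]
      simp [bne_iff_ne, hx]

-- the whole per-method fold from a name-fresh state is B's classification
lemma pv_foldAdd_classify (name : String) (ts : List String)
    (s : PySem.Dict String String) (m : PySem.Dict String (List String))
    (hs : s.contains name = false) (hm : m.contains name = false) :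
    pvFoldAdd name ts (s, m) = pvClassify (s, m) (name, ts) := by
  cases ts with
  | nil => rfl
  | cons t0 rest =>
    simp only [pvFoldAdd, List.foldl_cons]
    have h1 : pvAddMethod name t0 (s, m) = (s.insert name t0, m) := by
      simp [pvAddMethod, hm, hs]
    rw [h1]
    have := pv_foldAdd_phase name t0 rest s m hs hm
    simp only [pvFoldAdd] at this
    rw [this]
    simp only [pvClassify, List.findIdx?_cons, bne_self_eq_false, Bool.false_eq_true, if_false]
    cases hfi : rest.findIdx? (fun x => x != t0) with
    | none => simp
    | some j => simp

-- classify only touches key p.1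
lemma pv_classify_contains (st : PySem.Dict String String × PySem.Dict String (List String))
    (p : String × List String) (k : String) (hk : k ≠ p.1) :
    ((pvClassify st p).1.contains k = st.1.contains k) ∧
    ((pvClassify st p).2.contains k = st.2.contains k) := by
  unfold pvClassify
  split
  · exact ⟨rfl, rfl⟩
  · split <;> simp [PySem.Dict.contains_insert, hk]

-- A's outer loop = classify each method's emitted list, in order
lemma pv_outerA (vtd : List (String × List (String × String)))
    (fvd : List (String × List (String × Int))) :
    ∀ (st : PySem.Dict String String × PySem.Dict String (List String)),
    (fvd.map (fun p => p.1)).Nodup →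
    (∀ p ∈ fvd, st.1.contains p.1 = false ∧ st.2.contains p.1 = false) →
    fvd.foldl (pvStepMethodA vtd) st
      = (fvd.map (fun p => (p.1, pvTsOf vtd p.2))).foldl pvClassify st := by
  induction fvd with
  | nil => intro st _ _; rfl
  | cons mp fvd ih =>
    intro st hnd hfresh
    obtain ⟨hn1, hnd'⟩ := List.nodup_cons.1 hnd
    simp only [List.foldl_cons, List.map_cons]
    have h1 : pvStepMethodA vtd st mp = pvClassify st (mp.1, pvTsOf vtd mp.2) := by
      obtain ⟨hs, hm⟩ := hfresh mp (by simp)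
      show mp.2.foldl (pvStepVarA vtd mp.1) st = _
      rw [pv_innerA]
      obtain ⟨s, m⟩ := st
      exact pv_foldAdd_classify mp.1 _ s m hs hm
    rw [h1]
    apply ih _ hnd'
    intro p hp
    have hne : p.1 ≠ (mp.1, pvTsOf vtd mp.2).1 := by
      intro h; exact hn1 (by simp only []; rw [← h]; exact List.mem_map_of_mem hp)
    have hcc := pv_classify_contains st (mp.1, pvTsOf vtd mp.2) p.1 hne
    obtain ⟨h1', h2'⟩ := hfresh p (by simp [hp])
    exact ⟨hcc.1.trans h1', hcc.2.trans h2'⟩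

-- two appends under the same key compose
lemma pv_modify_modify (name : String) (d : PySem.Dict String (List String))
    (a b : List String) :
    ((d.modify name [] (fun l => l ++ a)).modify name [] (fun l => l ++ b))
      = d.modify name [] (fun l => l ++ (a ++ b)) := by
  simp [PySem.Dict.modify, PySem.Dict.getD_insert_self, PySem.Dict.insert_insert_self,
    List.append_assoc]

-- B's pass-1 inner loop appends all emitted types under the method's key
lemma pv_innerB (vtd : List (String × List (String × String))) (name : String)
    (vd : List (String × Int)) :
    ∀ (d : PySem.Dict String (List String)),
    vd.foldl (pvStepEmit vtd name) d
      = if (pvTsOf vtd vd).isEmpty then d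
        else d.modify name [] (fun l => l ++ pvTsOf vtd vd) := by
  simp only [pvTsOf]
  induction vd with
  | nil => intro d; simp
  | cons q vd ih =>
    intro d
    simp only [List.foldl_cons, List.flatMap_cons]
    by_cases he : pvEmitTypes vtd q.1 q.2 = []
    · simp only [pvStepEmit, he, List.isEmpty_nil, if_true, List.nil_append]
      exact ih d
    · simp only [pvStepEmit, List.isEmpty_eq_false_iff.2 he]
      rw [ih]
      by_cases hF : vd.flatMap (fun q => pvEmitTypes vtd q.1 q.2) = []
      · simp [hF, he]
      · simp [List.isEmpty_eq_false_iff.2 hF, hF, he, pv_modify_modify]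

-- B's pass 1 produces exactly the (method, emitted types) pairs with a nonempty list
lemma pv_outerB (vtd : List (String × List (String × String)))
    (fvd : List (String × List (String × Int))) :
    ∀ (d : PySem.Dict String (List String)),
    (fvd.map (fun p => p.1)).Nodup →
    (∀ p ∈ fvd, d.contains p.1 = false) →
    (fvd.foldl (fun d mp => mp.2.foldl (pvStepEmit vtd mp.1) d) d).items
      = d.items ++ ((fvd.map (fun p => (p.1, pvTsOf vtd p.2))).filter
          (fun p => !p.2.isEmpty)) := by
  induction fvd with
  | nil => intro d _ _; simp
  | cons mp fvd ih =>
    intro d hnd hfresh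
    obtain ⟨hn1, hnd'⟩ := List.nodup_cons.1 hnd
    simp only [List.foldl_cons, List.map_cons, List.filter_cons]
    rw [pv_innerB]
    by_cases hF : (pvTsOf vtd mp.2).isEmpty = true
    · simp only [hF, if_true, Bool.not_true, Bool.false_eq_true, if_false]
      exact ih d hnd' (fun p hp => hfresh p (by simp [hp]))
    · rw [Bool.not_eq_true] at hF
      simp only [hF, Bool.false_eq_true, if_false, Bool.not_false, if_true]
      have hc : d.contains mp.1 = false := (hfresh mp (by simp))
      have hmod : d.modify mp.1 [] (fun l => l ++ pvTsOf vtd mp.2)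
          = d.insert mp.1 (pvTsOf vtd mp.2) := by
        simp [PySem.Dict.modify, PySem.Dict.getD_of_not_contains d [] hc]
      rw [hmod]
      have hfresh' : ∀ p ∈ fvd, (d.insert mp.1 (pvTsOf vtd mp.2)).contains p.1 = false := by
        intro p hp
        rw [PySem.Dict.contains_insert]
        have : p.1 ≠ mp.1 := by
          intro h; exact hn1 (by simp only []; rw [← h]; exact List.mem_map_of_mem hp)
        simp [this, hfresh p (by simp [hp])]
      rw [ih _ hnd' hfresh']
      rw [PySem.Dict.items_insert_of_not_contains d _ hc]
      simp

-- classifying skips empty lists, so pass 1's nonemptiness filter may be dropped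
lemma pv_classify_filter (l : List (String × List String))
    (st : PySem.Dict String String × PySem.Dict String (List String)) :
    (l.filter (fun p => !p.2.isEmpty)).foldl pvClassify st = l.foldl pvClassify st := by
  induction l generalizing st with
  | nil => rfl
  | cons p l ih =>
    cases hp : p.2 with
    | nil =>
      have h0 : pvClassify st p = st := by simp [pvClassify, hp]
      simp [hp, h0, ih]
    | cons a b =>
      simp [hp, ih]

-- ===== VERDICT (by name: the statement is the Claim_ definition above) =====
theorem determine_var_package_spec : Claim_equal_determine_var_package := by
  intro vtd fvd _ hpre
  obtain ⟨hnd, -⟩ := hpre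
  show _ = _
  unfold determine_var_package determine_var_package_alt
  have hA := pv_outerA vtd fvd (PySem.Dict.empty, PySem.Dict.empty) hnd
    (fun p _ => ⟨rfl, rfl⟩)
  have hB := pv_outerB vtd fvd PySem.Dict.empty hnd (fun p _ => rfl)
  have hitems : (fvd.foldl (fun d mp => mp.2.foldl (pvStepEmit vtd mp.1) d)
      PySem.Dict.empty).items
      = ((fvd.map (fun p => (p.1, pvTsOf vtd p.2))).filter (fun p => !p.2.isEmpty)) := by
    simpa using hB
  rw [hA]
  simp only [hitems, pv_classify_filter]
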